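-- pv_equiv track=rewrite | github.com/bonniemcc/search_sort_algorithms | creditcard.py | EvenDigits
-- ===== SOURCE A (Python) =====
-- def EvenDigits(num):
--     even_digits = []
--     #convert integer to a list of digits
--     num_list = [int(k) for k in str(num)]
--     for t in range(1,len(num_list),2):
--         even_digits.append(2*num_list[t])
--     for n in range(len(even_digits)):
--         if even_digits[n] > 9:
--             #convert integer to a list of digits and sum
--             value = [int(v) for v in str(even_digits[n])]
--             even_digits[n] = sum(value)
--         even_digits.append(even_digits[n])
--     return sum(even_digits)
-- ===== SOURCE B (Python) =====
-- def EvenDigits(num):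
--     # One accumulator pass over the odd-index digits; A's second loop duplicates
--     # every element of its list, so the result is twice the reduced sum.
--     num_list = [int(k) for k in str(num)]
--     total = 0
--     for t in range(1, len(num_list), 2):
--         d = 2 * num_list[t]
--         if d > 9:
--             d = sum(int(v) for v in str(d))
--         total += d
--     return 2 * total
-- ===== Notes on version B (the rewrite author's own statement) =====
-- stated objective: simpler
-- what changed: Replaces A's two list-building passes (an even_digits list that is mutated and self-appended while iterating) with a single running-total pass over the odd-index digits, returning twice the sum since A's self-append duplicates every element.
import Mathlib
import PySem

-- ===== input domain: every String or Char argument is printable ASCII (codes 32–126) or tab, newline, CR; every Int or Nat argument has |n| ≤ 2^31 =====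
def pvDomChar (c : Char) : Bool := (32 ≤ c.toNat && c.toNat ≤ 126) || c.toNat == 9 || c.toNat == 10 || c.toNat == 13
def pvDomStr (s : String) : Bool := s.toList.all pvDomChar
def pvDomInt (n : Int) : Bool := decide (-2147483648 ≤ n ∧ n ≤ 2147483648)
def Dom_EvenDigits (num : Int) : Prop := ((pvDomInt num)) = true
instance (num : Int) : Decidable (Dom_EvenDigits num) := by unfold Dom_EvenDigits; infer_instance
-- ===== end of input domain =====

-- B replaces A's two list-building passes (with a self-appending list) by one running-total
-- pass over the odd-index digits, doubled at the end; equal return values proved on Pre_.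

-- int(k) for a single character k (both Pythons do exactly this); total via getD,
-- exact whenever the character is a digit (guaranteed by Pre_: num ≥ 0).
def pyDigit (c : Char) : Int := (PySem.Int.ofChars? [c]).getD 0

-- sum(int(v) for v in str(x)) — the digit-sum both Pythons take when a doubled digit exceeds 9
def digitSum (x : Int) : Int := ((PySem.Int.toChars x).map pyDigit).sum

-- ===== PORT A =====
-- body of A's second for-loop: read even_digits[n], reduce in place if > 9, append even_digits[n]
def luhnStep (lst : List Int) (n : Int) : List Int :=
  let x := PySem.List.pyGetD lst n 0
  if x > 9 then
    let lst' := PySem.List.pySetD lst n (digitSum x)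
    lst' ++ [PySem.List.pyGetD lst' n 0]
  else
    lst ++ [x]

def EvenDigits (num : Int) : Int :=
  let numList := (PySem.Int.toChars num).map pyDigit
  let evenDigits := (PySem.List.pyRange 1 (numList.length : Int) 2).foldl
    (fun acc t => acc ++ [2 * PySem.List.pyGetD numList t 0]) []
  let final := (PySem.List.pyRange 0 (evenDigits.length : Int) 1).foldl luhnStep evenDigits
  final.sum

-- ===== PORT B =====
def EvenDigits_alt (num : Int) : Int :=
  let numList := (PySem.Int.toChars num).map pyDigit
  let total := (PySem.List.pyRange 1 (numList.length : Int) 2).foldl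
    (fun acc t =>
      let d := 2 * PySem.List.pyGetD numList t 0
      acc + (if d > 9 then digitSum d else d)) 0
  2 * total

-- ===== PRECONDITION & SPEC =====
-- Pre_ excludes negative inputs: there str(num) starts with '-' and int('-') raises ValueError in A (and in B).
def Pre_EvenDigits (num : Int) : Prop := 0 ≤ num
instance (num : Int) : Decidable (Pre_EvenDigits num) := by unfold Pre_EvenDigits; infer_instance
def pvWitness_EvenDigits : Int := (12345)

def Spec_EvenDigits (num : Int) (out : Int) : Prop := out = EvenDigits_alt num
instance (num : Int) (out : Int) : Decidable (Spec_EvenDigits num out) := by unfold Spec_EvenDigits; infer_instance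

-- ===== CLAIM (what is proved, stated in full; the proofs are below) =====
def Claim_equal_EvenDigits : Prop := ∀ (num : Int), Dom_EvenDigits num → Pre_EvenDigits num → Spec_EvenDigits num (EvenDigits num)

-- ===== LEMMAS AND PROOFS =====

-- the reduced value of one entry
def reduceVal (x : Int) : Int := if x > 9 then digitSum x else x

lemma getD_append_cons (a r : List Int) (x : Int) :
    (a ++ x :: r).getD a.length 0 = x := by
  induction a with
  | nil => rfl
  | cons h t ih => simpa using ih

lemma set_append_cons (a r : List Int) (x v : Int) :
    (a ++ x :: r).set a.length v = a ++ v :: r := by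
  induction a with
  | nil => rfl
  | cons h t ih => simp [ih]

lemma luhnStep_at (a r : List Int) (x : Int) :
    luhnStep (a ++ x :: r) (a.length : Int) = (a ++ reduceVal x :: r) ++ [reduceVal x] := by
  simp only [luhnStep, reduceVal, PySem.List.pyGetD_natCast, PySem.List.pySetD_natCast,
    getD_append_cons, set_append_cons]
  split_ifs with h <;> simp

lemma loop2 (b a c : List Int) :
    (PySem.List.pyRange (a.length : Int) ((a.length : Int) + b.length) 1).foldl luhnStep (a ++ b ++ c)
      = a ++ b.map reduceVal ++ c ++ b.map reduceVal := by
  induction b generalizing a c with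
  | nil =>
    rw [show ((a.length : Int) + ([] : List Int).length) = (a.length : Int) by simp,
      PySem.List.pyRange_one_eq_nil le_rfl]
    simp
  | cons x b' ih =>
    rw [PySem.List.pyRange_one_cons (by simp)]
    simp only [List.foldl_cons]
    have h1 : a ++ x :: b' ++ c = a ++ x :: (b' ++ c) := by simp
    rw [h1, luhnStep_at a (b' ++ c) x]
    have h2 : (a ++ reduceVal x :: (b' ++ c)) ++ [reduceVal x]
        = (a ++ [reduceVal x]) ++ b' ++ (c ++ [reduceVal x]) := by simp
    have h3 : ((a.length : Int) + 1) = (((a ++ [reduceVal x]).length : Int)) := by simp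
    have h4 : ((a.length : Int) + (x :: b').length) = ((a ++ [reduceVal x]).length : Int) + b'.length := by
      simp; omega
    rw [h2, h4, h3, ih (a ++ [reduceVal x]) (c ++ [reduceVal x])]
    simp

-- ===== VERDICT (by name: the statement is the Claim_ definition above) =====
theorem EvenDigits_spec : Claim_equal_EvenDigits := by
  intro num _ _
  unfold Spec_EvenDigits
  show EvenDigits num = EvenDigits_alt num
  simp only [EvenDigits, EvenDigits_alt]
  set dl := (PySem.Int.toChars num).map pyDigit with hdl
  set r := PySem.List.pyRange 1 (dl.length : Int) 2 with hr
  have hed : r.foldl (fun acc t => acc ++ [2 * PySem.List.pyGetD dl t 0]) []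
      = r.map (fun t => 2 * PySem.List.pyGetD dl t 0) := by
    simpa using PySem.List.foldl_append_singleton_eq_map
      (l := r) (f := fun t => 2 * PySem.List.pyGetD dl t 0) (acc := [])
  rw [hed]
  set ed := r.map (fun t => 2 * PySem.List.pyGetD dl t 0) with hedl
  have hmain := loop2 ed [] []
  simp only [List.nil_append, List.append_nil, List.length_nil, Int.natCast_zero,
    zero_add] at hmain
  rw [show ((0 : Int) = ((([] : List Int).length : Int))) from rfl] at hmain
  have : (PySem.List.pyRange 0 (ed.length : Int) 1).foldl luhnStep ed
      = ed.map reduceVal ++ ed.map reduceVal := by simpa using hmain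
  rw [this]
  have hb : r.foldl (fun acc t =>
        acc + (if 2 * PySem.List.pyGetD dl t 0 > 9 then digitSum (2 * PySem.List.pyGetD dl t 0)
               else 2 * PySem.List.pyGetD dl t 0)) 0
      = 0 + (r.map (fun t => reduceVal (2 * PySem.List.pyGetD dl t 0))).sum := by
    exact PySem.List.foldl_add (l := r)
      (g := fun t => reduceVal (2 * PySem.List.pyGetD dl t 0)) (a := 0)
  simp only [hedl, List.map_map, List.sum_append]
  rw [hb]
  simp [Function.comp_def, two_mul]
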